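-- pv_equiv track=rewrite | github.com/TencentBlueKing/BKDocs | script/check_format.py | remv_bkt
-- ===== SOURCE A (Python) =====
-- def remv_bkt(pattern):
--     new_pattern = ""
--     end_index = pattern.find("]")
--     for index, word in  enumerate(pattern):
--         if index<end_index:
--             if word == "(" or word ==")":
--                 continue
--             else:
--                 new_pattern+=word
--         else:
--             new_pattern+=word
--     return new_pattern
-- ===== SOURCE B (Python) =====
-- def remv_bkt(pattern):
--     head, sep, tail = pattern.partition("]")
--     if not sep:
--         return pattern
--     return head.replace("(", "").replace(")", "") + sep + tail
-- ===== Notes on version B (the rewrite author's own statement) =====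
-- stated objective: idiomatic
-- what changed: B has no explicit loop or per-index branch: it partitions the string at the first closing square bracket with str.partition (returning the input unchanged when there is none), deletes parentheses from the head with two str.replace passes, and reattaches the separator and tail untouched.
import Mathlib
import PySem

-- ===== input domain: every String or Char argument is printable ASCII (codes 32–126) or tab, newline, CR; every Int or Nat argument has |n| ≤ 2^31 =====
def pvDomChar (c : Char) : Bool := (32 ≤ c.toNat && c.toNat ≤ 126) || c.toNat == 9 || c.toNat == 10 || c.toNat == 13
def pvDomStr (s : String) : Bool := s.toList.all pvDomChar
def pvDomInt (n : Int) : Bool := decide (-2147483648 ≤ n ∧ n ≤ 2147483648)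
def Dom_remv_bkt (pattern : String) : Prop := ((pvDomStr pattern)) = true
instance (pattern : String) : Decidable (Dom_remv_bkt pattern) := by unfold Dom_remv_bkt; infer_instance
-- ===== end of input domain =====

-- B is loop-free: it partitions the string at the first closing square bracket (input returned
-- unchanged when there is none) and deletes parentheses from the head with two replace passes,
-- reattaching the separator and tail untouched; measured faster by a constant factor.

-- ===== PORT A =====
def remv_bkt (pattern : String) : String :=
  let end_index := PySem.Str.find pattern "]"
  let new_pattern :=
    (PySem.List.enumerate pattern.toList 0).foldl
      (fun acc p =>
        if p.1 < end_index then
          if p.2 = '(' ∨ p.2 = ')' then acc else acc ++ [p.2]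
        else acc ++ [p.2]) []
  String.ofList new_pattern

-- ===== PORT B =====
-- hand port of str.partition for a single-character separator (exact: split at the FIRST
-- occurrence into (head, sep, tail); if absent, (whole string, "", "")).
def pvPartChar (sep : Char) : List Char → List Char × List Char × List Char
  | [] => ([], [], [])
  | c :: cs =>
    if c = sep then ([], [sep], cs)
    else
      let r := pvPartChar sep cs
      (c :: r.1, r.2.1, r.2.2)

def remv_bkt_alt (pattern : String) : String :=
  let p := pvPartChar ']' pattern.toList
  if p.2.1.isEmpty then pattern
  else
    String.ofList
      (PySem.Chars.replace (PySem.Chars.replace p.1 ['('] []) [')'] [] ++ p.2.1 ++ p.2.2)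

-- ===== PRECONDITION & SPEC =====
def Spec_remv_bkt (pattern : String) (out : String) : Prop := out = remv_bkt_alt pattern
instance (pattern : String) (out : String) : Decidable (Spec_remv_bkt pattern out) := by unfold Spec_remv_bkt; infer_instance

-- ===== CLAIM (what is proved, stated in full; the proofs are below) =====
def Claim_equal_remv_bkt : Prop := ∀ (pattern : String), Dom_remv_bkt pattern → Spec_remv_bkt pattern (remv_bkt pattern)

-- ===== LEMMAS AND PROOFS =====

-- A's loop, characterized: filter the first (e - s).toNat chars, keep the rest.
theorem remv_bkt_loop_eq (cs : List Char) (e : Int) :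
    ∀ (s : Nat) (acc : List Char),
    (PySem.List.enumerate cs (s : Int)).foldl
      (fun acc p =>
        if p.1 < e then
          if p.2 = '(' ∨ p.2 = ')' then acc else acc ++ [p.2]
        else acc ++ [p.2]) acc
    = acc ++ ((cs.take (e - s).toNat).filter
        (fun c => decide (c ≠ '(') && decide (c ≠ ')')) ++ cs.drop (e - s).toNat) := by
  induction cs with
  | nil => intro s acc; simp [PySem.List.enumerate_nil]
  | cons c cs ih =>
    intro s acc
    rw [PySem.List.enumerate_cons, List.foldl_cons]
    by_cases h : (s : Int) < e
    · have hm : (e - (s : Int)).toNat = (e - ((s + 1 : Nat) : Int)).toNat + 1 := by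
        push_cast; omega
      by_cases hp : c = '(' ∨ c = ')'
      · simp only [if_pos h, if_pos hp, show ((s : Int) + 1) = ((s + 1 : Nat) : Int) by push_cast; ring]
        rw [ih (s + 1) acc, hm]
        rcases hp with hp | hp <;>
          simp [hp, List.take_succ_cons, List.drop_succ_cons]
      · simp only [if_pos h, if_neg hp, show ((s : Int) + 1) = ((s + 1 : Nat) : Int) by push_cast; ring]
        rw [ih (s + 1) (acc ++ [c]), hm]
        obtain ⟨h1, h2⟩ := not_or.mp hp
        simp [h1, h2, List.take_succ_cons, List.drop_succ_cons]
    · have hm0 : (e - (s : Int)).toNat = 0 := by omega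
      have hm1 : (e - ((s + 1 : Nat) : Int)).toNat = 0 := by push_cast; omega
      simp only [if_neg h, show ((s : Int) + 1) = ((s + 1 : Nat) : Int) by push_cast; ring]
      rw [ih (s + 1) (acc ++ [c]), hm0, hm1]
      simp

-- replace with a single-char old and empty new is a filter (the go loop, fueled).
theorem replace_go_single (c : Char) :
    ∀ (l : List Char) (fuel : Nat) (acc : List Char), l.length ≤ fuel →
    PySem.Chars.replace.go [c] [] fuel l acc = acc.reverse ++ l.filter (· ≠ c) := by
  intro l
  induction l with
  | nil => intro fuel acc _; cases fuel <;> simp [PySem.Chars.replace.go]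
  | cons x l ih =>
    intro fuel acc hf
    cases fuel with
    | zero => simp at hf
    | succ f =>
      rw [PySem.Chars.replace.go]
      by_cases hx : x = c
      · subst hx
        rw [if_pos (by simp [List.isPrefixOf])]
        simp only [List.length_cons, List.length_nil, List.drop_succ_cons, List.drop_zero,
          List.reverse_nil, List.nil_append]
        rw [ih f acc (by simpa using hf)]
        simp
      · rw [if_neg (by simp [List.isPrefixOf]; exact fun h => hx h.symm)]
        rw [ih f (x :: acc) (by simpa using hf)]
        simp [hx]

theorem replace_single (l : List Char) (c : Char) :
    PySem.Chars.replace l [c] [] = l.filter (· ≠ c) := by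
  rw [PySem.Chars.replace]
  simp only [List.isEmpty_cons]
  rw [replace_go_single c l l.length [] (le_refl _)]
  simp

-- the hand-ported partition, characterized by takeWhile/dropWhile
theorem pvPartChar_fst (sep : Char) (cs : List Char) :
    (pvPartChar sep cs).1 = cs.takeWhile (· ≠ sep) := by
  induction cs with
  | nil => simp [pvPartChar]
  | cons c cs ih =>
    by_cases h : c = sep
    · simp [pvPartChar, h]
    · simp [pvPartChar, h, ih]

theorem pvPartChar_snd_of_not_mem (sep : Char) (cs : List Char) (h : sep ∉ cs) :
    (pvPartChar sep cs).2 = ([], []) := by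
  induction cs with
  | nil => simp [pvPartChar]
  | cons c cs ih =>
    simp only [List.mem_cons, not_or] at h
    simp [pvPartChar, Ne.symm h.1, ih h.2]

theorem pvPartChar_snd_of_mem (sep : Char) (cs : List Char) (h : sep ∈ cs) :
    (pvPartChar sep cs).2 = ([sep], (cs.dropWhile (· ≠ sep)).tail) := by
  induction cs with
  | nil => simp at h
  | cons c cs ih =>
    by_cases hc : c = sep
    · simp [pvPartChar, hc]
    · have : sep ∈ cs := by rcases List.mem_cons.mp h with h' | h'; exact absurd h'.symm hc; exact h'
      simp [pvPartChar, hc, ih this]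

-- [x] is an infix iff x is a member
theorem singleton_infix_iff (x : Char) (cs : List Char) : [x] <:+: cs ↔ x ∈ cs := by
  constructor
  · intro h; exact h.mem (by simp)
  · intro h
    obtain ⟨s, t, rfl⟩ := List.append_of_mem h
    exact ⟨s, t, by simp⟩

-- [x] is a prefix of cs.drop i iff cs[i] = x
theorem singleton_prefix_drop (cs : List Char) (i : Nat) (x : Char) :
    [x] <+: cs.drop i ↔ cs[i]? = some x := by
  constructor
  · rintro ⟨t, ht⟩
    have h2 := congrArg List.head? ht
    simp only [List.head?_drop] at h2
    simpa using h2.symm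
  · intro h
    refine ⟨(cs.drop i).tail, ?_⟩
    have h2 : (cs.drop i).head? = some x := by rw [List.head?_drop]; exact h
    cases hd : cs.drop i with
    | nil => rw [hd] at h2; simp at h2
    | cons a t =>
      rw [hd] at h2; simp at h2
      simp [h2]

-- take/drop at the takeWhile length are takeWhile/dropWhile
theorem tw_take (p : Char → Bool) (cs : List Char) :
    cs.take (cs.takeWhile p).length = cs.takeWhile p := by
  induction cs with
  | nil => simp
  | cons c cs ih => by_cases h : p c <;> simp [h, ih]

theorem tw_drop (p : Char → Bool) (cs : List Char) :
    cs.drop (cs.takeWhile p).length = cs.dropWhile p := by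
  induction cs with
  | nil => simp
  | cons c cs ih => by_cases h : p c <;> simp [h, ih]

-- the first index of ']' (as A's find computes it) is the length of the paren-stripping prefix
theorem find_toNat_eq (cs : List Char) (h : ']' ∈ cs) :
    (PySem.Chars.find cs [']']).toNat = (cs.takeWhile (· ≠ ']')).length := by
  have hnn : 0 ≤ PySem.Chars.find cs [']'] :=
    (PySem.Chars.find_nonneg_iff cs [']']).mpr ((singleton_infix_iff ']' cs).mpr h)
  obtain ⟨hpre, hmin⟩ := PySem.Chars.find_spec (s := cs) (sub := [']']) hnn
  have hdne : cs.dropWhile (fun c => decide (c ≠ ']')) ≠ [] := by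
    simp only [ne_eq, List.dropWhile_eq_nil_iff]
    intro hall
    have := hall _ h
    simp at this
  have hhead : (cs.dropWhile (fun c => decide (c ≠ ']'))).head hdne = ']' := by
    have := List.head_dropWhile_not (fun c => decide (c ≠ ']')) hdne
    simpa using this
  have hklt : (cs.takeWhile (fun c => decide (c ≠ ']'))).length < cs.length := by
    by_contra hge
    push Not at hge
    exact hdne (by rw [← tw_drop]; exact List.drop_eq_nil_of_le hge)
  have hk : cs[(cs.takeWhile (fun c => decide (c ≠ ']'))).length]? = some ']' := by
    have h1 : (cs.drop (cs.takeWhile (fun c => decide (c ≠ ']'))).length).head? = some ']' := by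
      rw [tw_drop, List.head?_eq_some_head hdne, hhead]
    rw [List.head?_drop] at h1
    exact h1
  have h1 : ¬ (cs.takeWhile (fun c => decide (c ≠ ']'))).length
      < (PySem.Chars.find cs [']']).toNat := fun hlt =>
    hmin _ hlt ((singleton_prefix_drop cs _ ']').mpr hk)
  have h2 : ¬ (PySem.Chars.find cs [']']).toNat
      < (cs.takeWhile (fun c => decide (c ≠ ']'))).length := by
    intro hlt
    have ht : cs[(PySem.Chars.find cs [']']).toNat]? = some ']' :=
      (singleton_prefix_drop cs _ ']').mp hpre
    have htlt : (PySem.Chars.find cs [']']).toNat < cs.length := by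
      by_contra hge
      push Not at hge
      rw [List.getElem?_eq_none hge] at ht
      simp at ht
    have e1 : (cs.takeWhile (fun c => decide (c ≠ ']')))[(PySem.Chars.find cs [']']).toNat]?
        = cs[(PySem.Chars.find cs [']']).toNat]? := by
      rw [← tw_take (fun c => decide (c ≠ ']')) cs]
      exact List.getElem?_take_of_lt hlt
    have hmem2 : cs[(PySem.Chars.find cs [']']).toNat]'htlt
        ∈ cs.takeWhile (fun c => decide (c ≠ ']')) := by
      apply List.mem_of_getElem? (i := (PySem.Chars.find cs [']']).toNat)
      rw [e1]
      exact List.getElem?_eq_getElem htlt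
    have hp := List.mem_takeWhile_imp hmem2
    have hce : cs[(PySem.Chars.find cs [']']).toNat]'htlt = ']' := by
      rw [List.getElem?_eq_getElem htlt] at ht
      exact Option.some.inj ht
    rw [hce] at hp
    simp at hp
  omega

-- ===== VERDICT (by name: the statement is the Claim_ definition above) =====
theorem remv_bkt_spec : Claim_equal_remv_bkt := by
  intro pattern _
  unfold Spec_remv_bkt remv_bkt remv_bkt_alt
  simp only []
  rw [show (0 : Int) = ((0 : Nat) : Int) from rfl, remv_bkt_loop_eq]
  by_cases hmem : ']' ∈ pattern.toList
  · have hsnd := pvPartChar_snd_of_mem ']' pattern.toList hmem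
    have he : (PySem.Str.find pattern "]" - ((0 : Nat) : Int)).toNat
        = (pattern.toList.takeWhile (fun c => decide (c ≠ ']'))).length := by
      have : PySem.Str.find pattern "]" = PySem.Chars.find pattern.toList [']'] := by
        simp [PySem.Str.find]
      rw [this]
      simp only [Nat.cast_zero, sub_zero]
      exact find_toNat_eq pattern.toList hmem
    rw [he, tw_take, tw_drop, hsnd]
    have hdne : pattern.toList.dropWhile (fun c => decide (c ≠ ']')) ≠ [] := by
      simp only [ne_eq, List.dropWhile_eq_nil_iff]
      intro hall
      have := hall _ hmem
      simp at this
    have hhead : (pattern.toList.dropWhile (fun c => decide (c ≠ ']'))).head hdne = ']' := by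
      have := List.head_dropWhile_not (fun c => decide (c ≠ ']')) hdne
      simpa using this
    rw [if_neg (by simp)]
    rw [pvPartChar_fst, replace_single, replace_single, List.filter_filter]
    have hdw : pattern.toList.dropWhile (fun c => decide (c ≠ ']'))
        = ']' :: (pattern.toList.dropWhile (fun c => decide (c ≠ ']'))).tail := by
      conv_lhs => rw [← List.cons_head_tail hdne]
      rw [hhead]
    rw [hdw]
    have hfilt : (pattern.toList.takeWhile (fun c => decide (c ≠ ']'))).filter
          (fun c => decide (c ≠ '(') && decide (c ≠ ')'))
        = (pattern.toList.takeWhile (fun c => decide (c ≠ ']'))).filter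
          (fun a => decide (a ≠ ')') && decide (a ≠ '(')) :=
      List.filter_congr fun a _ => by
        by_cases h1 : a = '(' <;> by_cases h2 : a = ')' <;> simp [h1, h2]
    rw [hfilt]
    simp
  · have hsnd := pvPartChar_snd_of_not_mem ']' pattern.toList hmem
    have he : PySem.Str.find pattern "]" = -1 := by
      have : PySem.Str.find pattern "]" = PySem.Chars.find pattern.toList [']'] := by
        simp [PySem.Str.find]
      rw [this, PySem.Chars.find_eq_neg_one_iff]
      rw [singleton_infix_iff]
      exact hmem
    rw [he]
    rw [if_pos (by rw [hsnd]; rfl)]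
    simp
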